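-- pv_equiv track=rewrite | github.com/mihow/butterfly-planner | src/butterfly_planner/renderers/sightings_map.py | _year_range
-- ===== SOURCE A (Python) =====
-- from typing import Any
--
-- def _year_range(observations: list[dict[str, Any]]) -> str:
--     """Derive year range string from observation dates, e.g. '2014-2026'."""
--     years: set[int] = set()
--     for obs in observations:
--         observed_on = obs.get("observed_on", "")
--         if observed_on and len(observed_on) >= 4 and observed_on[:4].isdigit():
--             years.add(int(observed_on[:4]))
--     if not years:
--         return "all years"
--     min_year, max_year = min(years), max(years)
--     if min_year == max_year:
--         return str(min_year)
--     return f"{min_year}\u2013{max_year}"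
-- ===== SOURCE B (Python) =====
-- from typing import Any
--
-- def _year_range(observations: list[dict[str, Any]]) -> str:
--     """Derive year range string from observation dates, e.g. '2014-2026'."""
--     lo = hi = None
--     for obs in observations:
--         observed_on = obs.get("observed_on", "")
--         if observed_on and len(observed_on) >= 4 and observed_on[:4].isdigit():
--             y = int(observed_on[:4])
--             if lo is None:
--                 lo = hi = y
--             else:
--                 if y < lo:
--                     lo = y
--                 if y > hi:
--                     hi = y
--     if lo is None:
--         return "all years"
--     if lo == hi:
--         return str(lo)
--     return f"{lo}\u2013{hi}"
-- ===== Notes on version B (the rewrite author's own statement) =====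
-- stated objective: simpler
-- what changed: Replaces the intermediate set plus two separate min()/max() reduction scans with a single accumulating pass keeping running lo/hi bounds (no set, no post-loop scans).
import Mathlib
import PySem

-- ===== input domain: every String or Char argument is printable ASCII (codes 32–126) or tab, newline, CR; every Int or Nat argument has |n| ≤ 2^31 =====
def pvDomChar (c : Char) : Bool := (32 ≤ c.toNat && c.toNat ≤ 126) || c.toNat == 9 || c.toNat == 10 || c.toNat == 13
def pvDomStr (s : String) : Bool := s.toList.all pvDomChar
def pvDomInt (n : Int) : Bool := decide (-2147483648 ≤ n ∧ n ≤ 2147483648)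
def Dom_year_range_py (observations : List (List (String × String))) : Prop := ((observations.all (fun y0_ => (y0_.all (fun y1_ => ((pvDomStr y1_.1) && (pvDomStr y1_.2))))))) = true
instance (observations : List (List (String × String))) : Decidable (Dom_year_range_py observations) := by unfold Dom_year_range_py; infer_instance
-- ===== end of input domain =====

-- B replaces A's intermediate set and its two post-loop min()/max() scans by one
-- accumulating pass keeping running lo/hi bounds (objective: simpler).

-- ===== PORT A =====
-- the shared guard: 'observed_on and len(observed_on) >= 4 and observed_on[:4].isdigit()'
def yrGuard (s : String) : Bool :=
  decide (s ≠ "") && decide ((4 : Int) ≤ PySem.Str.len s) &&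
    PySem.Str.strIsdigit (PySem.Str.slice s none (some 4))

-- int(observed_on[:4]); exact here: the guard guarantees the 4 chars are digits, so ofStr? is some
def yrYear (s : String) : Int :=
  (PySem.Int.ofStr? (PySem.Str.slice s none (some 4))).getD 0

def year_range_py (observations : List (List (String × String))) : String :=
  let years : PySem.Set Int :=
    observations.foldl (fun ys obs =>
      let observed_on := PySem.Dict.getD (PySem.Dict.mk obs) "observed_on" ""
      if yrGuard observed_on then PySem.Set.add ys (yrYear observed_on) else ys)
      PySem.Set.empty
  if years = [] then "all years"
  else
    let min_year := (PySem.List.min? years (fun x => x)).getD 0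
    let max_year := (PySem.List.max? years (fun x => x)).getD 0
    if min_year = max_year then PySem.Int.toStr min_year
    else PySem.Int.toStr min_year ++ "–" ++ PySem.Int.toStr max_year

-- ===== PORT B =====
def year_range_py_alt (observations : List (List (String × String))) : String :=
  let st : Option (Int × Int) :=
    observations.foldl (fun acc obs =>
      let observed_on := PySem.Dict.getD (PySem.Dict.mk obs) "observed_on" ""
      if yrGuard observed_on then
        let y := yrYear observed_on
        match acc with
        | none => some (y, y)
        | some (lo, hi) => some (if y < lo then y else lo, if hi < y then y else hi)
      else acc) none
  match st with
  | none => "all years"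
  | some (lo, hi) =>
      if lo = hi then PySem.Int.toStr lo
      else PySem.Int.toStr lo ++ "–" ++ PySem.Int.toStr hi

-- ===== PRECONDITION & SPEC =====
def Spec_year_range_py (observations : List (List (String × String))) (out : String) : Prop := out = year_range_py_alt observations
instance (observations : List (List (String × String))) (out : String) : Decidable (Spec_year_range_py observations out) := by unfold Spec_year_range_py; infer_instance

-- ===== CLAIM (what is proved, stated in full; the proofs are below) =====
def Claim_equal_year_range_py : Prop := ∀ (observations : List (List (String × String))), Dom_year_range_py observations → Spec_year_range_py observations (year_range_py observations)

-- ===== LEMMAS AND PROOFS =====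

-- the list of valid years, in order
def yrYears (observations : List (List (String × String))) : List Int :=
  observations.filterMap (fun obs =>
    let observed_on := PySem.Dict.getD (PySem.Dict.mk obs) "observed_on" ""
    if yrGuard observed_on then some (yrYear observed_on) else none)

theorem yrFoldA (observations : List (List (String × String))) (s : PySem.Set Int) :
    observations.foldl (fun ys obs =>
      let observed_on := PySem.Dict.getD (PySem.Dict.mk obs) "observed_on" ""
      if yrGuard observed_on then PySem.Set.add ys (yrYear observed_on) else ys) s
    = (yrYears observations).foldl PySem.Set.add s := by
  induction observations generalizing s with
  | nil => rfl
  | cons o t ih =>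
      simp only [List.foldl, yrYears, List.filterMap]
      by_cases h : yrGuard (PySem.Dict.getD (PySem.Dict.mk o) "observed_on" "") = true <;>
        simp [h, ih, yrYears]

theorem yrFoldB (observations : List (List (String × String))) (acc : Option (Int × Int)) :
    observations.foldl (fun acc obs =>
      let observed_on := PySem.Dict.getD (PySem.Dict.mk obs) "observed_on" ""
      if yrGuard observed_on then
        let y := yrYear observed_on
        match acc with
        | none => some (y, y)
        | some (lo, hi) => some (if y < lo then y else lo, if hi < y then y else hi)
      else acc) acc
    = (yrYears observations).foldl (fun acc y =>
        match acc with
        | none => some (y, y)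
        | some (lo, hi) => some (if y < lo then y else lo, if hi < y then y else hi)) acc := by
  induction observations generalizing acc with
  | nil => rfl
  | cons o t ih =>
      simp only [List.foldl, yrYears, List.filterMap]
      by_cases h : yrGuard (PySem.Dict.getD (PySem.Dict.mk o) "observed_on" "") = true <;>
        simp [h, ih, yrYears]

-- the pair fold computes (running min, running max)
theorem yrPairFold (t : List Int) (lo hi : Int) :
    t.foldl (fun acc y =>
        match acc with
        | none => some (y, y)
        | some (lo, hi) => some (if y < lo then y else lo, if hi < y then y else hi))
      (some (lo, hi))
    = some (t.foldl min lo, t.foldl max hi) := by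
  induction t generalizing lo hi with
  | nil => rfl
  | cons y t ih =>
      have h1 : (if y < lo then y else lo) = min lo y := by
        rw [min_def]; split_ifs <;> omega
      have h2 : (if hi < y then y else hi) = max hi y := by
        rw [max_def]; split_ifs <;> omega
      simp only [List.foldl, h1, h2, ih]

theorem yrSetMin (ys : List Int) (x : Int) (t : List Int) (h : ys = x :: t) :
    (PySem.List.min? (PySem.Set.ofList ys) (fun x => x)).getD 0 = t.foldl min x := by
  subst h
  have hne : PySem.Set.ofList (x :: t) ≠ [] := by
    intro he
    have : x ∈ PySem.Set.ofList (x :: t) := (PySem.Set.mem_ofList _ _).mpr (by simp)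
    simp [he] at this
  obtain ⟨l, ll, rest⟩ : ∃ a b, PySem.Set.ofList (x :: t) = a :: b := by
    cases hc : PySem.Set.ofList (x :: t) with
    | nil => exact absurd hc hne
    | cons a b => exact ⟨a, b, rfl⟩
  have hm : PySem.List.min? (PySem.Set.ofList (x :: t)) (fun x => x) = some (ll.foldl min l) := by
    rw [rest]; exact PySem.List.min?_id_cons l ll
  have hm' : PySem.List.min? (x :: t) (fun x => x) = some (t.foldl min x) :=
    PySem.List.min?_id_cons x t
  have hmem₁ := PySem.List.min?_mem hm
  have hmem₂ := PySem.List.min?_mem hm'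
  have hmin₁ := PySem.List.min?_isMin hm
  have hmin₂ := PySem.List.min?_isMin hm'
  rw [hm, Option.getD_some]
  have h₁ : ll.foldl min l ∈ x :: t := (PySem.Set.mem_ofList _ _).mp hmem₁
  have h₂ : t.foldl min x ∈ PySem.Set.ofList (x :: t) := (PySem.Set.mem_ofList _ _).mpr hmem₂
  exact le_antisymm (hmin₁ _ h₂) (hmin₂ _ h₁)

theorem yrSetMax (ys : List Int) (x : Int) (t : List Int) (h : ys = x :: t) :
    (PySem.List.max? (PySem.Set.ofList ys) (fun x => x)).getD 0 = t.foldl max x := by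
  subst h
  have hne : PySem.Set.ofList (x :: t) ≠ [] := by
    intro he
    have : x ∈ PySem.Set.ofList (x :: t) := (PySem.Set.mem_ofList _ _).mpr (by simp)
    simp [he] at this
  obtain ⟨l, ll, rest⟩ : ∃ a b, PySem.Set.ofList (x :: t) = a :: b := by
    cases hc : PySem.Set.ofList (x :: t) with
    | nil => exact absurd hc hne
    | cons a b => exact ⟨a, b, rfl⟩
  have hm : PySem.List.max? (PySem.Set.ofList (x :: t)) (fun x => x) = some (ll.foldl max l) := by
    rw [rest]; exact PySem.List.max?_id_cons l ll
  have hm' : PySem.List.max? (x :: t) (fun x => x) = some (t.foldl max x) :=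
    PySem.List.max?_id_cons x t
  have hmem₁ := PySem.List.max?_mem hm
  have hmem₂ := PySem.List.max?_mem hm'
  have hmax₁ := PySem.List.max?_isMax hm
  have hmax₂ := PySem.List.max?_isMax hm'
  rw [hm, Option.getD_some]
  have h₁ : ll.foldl max l ∈ x :: t := (PySem.Set.mem_ofList _ _).mp hmem₁
  have h₂ : t.foldl max x ∈ PySem.Set.ofList (x :: t) := (PySem.Set.mem_ofList _ _).mpr hmem₂
  exact le_antisymm (hmax₂ _ h₁) (hmax₁ _ h₂)

theorem yrOfListNil (ys : List Int) : PySem.Set.ofList ys = [] ↔ ys = [] := by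
  constructor
  · intro h
    cases ys with
    | nil => rfl
    | cons x t =>
        exfalso
        have : x ∈ PySem.Set.ofList (x :: t) := (PySem.Set.mem_ofList _ _).mpr (by simp)
        simp [h] at this
  · intro h; subst h; rfl

-- ===== VERDICT (by name: the statement is the Claim_ definition above) =====
theorem year_range_py_spec : Claim_equal_year_range_py := by
  intro observations _
  unfold Spec_year_range_py year_range_py year_range_py_alt
  rw [yrFoldA, yrFoldB]
  have hof : List.foldl PySem.Set.add PySem.Set.empty (yrYears observations)
      = PySem.Set.ofList (yrYears observations) := (PySem.Set.ofList_eq_foldl _).symm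
  rw [hof]
  cases hys : yrYears observations with
  | nil => simp
  | cons x t =>
      have hne : PySem.Set.ofList (x :: t) ≠ [] := by
        rw [Ne, yrOfListNil]; simp
      simp only [List.foldl, yrPairFold, hne,
        yrSetMin (x :: t) x t rfl, yrSetMax (x :: t) x t rfl]
      simp
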